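-- pv_equiv track=rewrite | github.com/tereshenko35ftgr/DotClick | Project/main.py | che
-- ===== SOURCE A (Python) =====
-- def che(text, repeats, dots, symbol):
--     result = ""
--     for _ in range(repeats):
--         for i in range(dots):
--             result += symbol * i + text + "\n"
--         for i in range(dots, 0, -1):
--             result += symbol * i + text + "\n"
--     return result
-- ===== SOURCE B (Python) =====
-- def che(text, repeats, dots, symbol):
--     if repeats <= 0 or dots <= 0:
--         return ""
--     period = 2 * dots
--     lines = []
--     for k in range(period * repeats):
--         j = k % period
--         m = j if j < dots else period - j
--         lines.append(symbol * m + text)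
--     return "\n".join(lines) + "\n"
-- ===== Notes on version B (the rewrite author's own statement) =====
-- stated objective: alternative
-- what changed: B replaces A's nested loops (outer repeats, two inner ramps) by one flat enumeration of all line indices, computing each line's symbol count from the index by modular arithmetic (j = k % (2*dots), count = j or 2*dots-j), and assembles the output once with a join instead of repeated string concatenation.
import Mathlib
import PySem

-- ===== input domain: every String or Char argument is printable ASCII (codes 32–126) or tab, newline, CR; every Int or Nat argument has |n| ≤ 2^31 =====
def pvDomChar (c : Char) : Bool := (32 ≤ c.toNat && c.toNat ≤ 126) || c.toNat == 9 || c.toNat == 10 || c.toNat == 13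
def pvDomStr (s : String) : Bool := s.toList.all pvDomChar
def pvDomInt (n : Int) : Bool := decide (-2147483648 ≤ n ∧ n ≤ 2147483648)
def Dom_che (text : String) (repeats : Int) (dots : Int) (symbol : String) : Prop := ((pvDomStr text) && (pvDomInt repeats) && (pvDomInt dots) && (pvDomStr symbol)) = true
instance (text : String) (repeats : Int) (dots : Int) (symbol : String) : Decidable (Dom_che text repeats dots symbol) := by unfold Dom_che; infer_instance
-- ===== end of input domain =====

-- B replaces A's nested loops by one flat enumeration of all line indices, computing each line's
-- symbol count from the index by modular arithmetic and joining the lines once (objective: alternative).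

-- ===== PORT A =====
-- A builds the result by appending one row at a time inside two nested count-up/count-down loops,
-- all repeated 'repeats' times (string concatenation done on List Char).
def che (text : String) (repeats : Int) (dots : Int) (symbol : String) : String :=
  let result : List Char :=
    (PySem.List.pyRange 0 repeats 1).foldl (fun result _ =>
      let result :=
        (PySem.List.pyRange 0 dots 1).foldl (fun r i =>
          r ++ PySem.List.pyRepeat symbol.toList i ++ text.toList ++ ['\n']) result
      (PySem.List.pyRange dots 0 (-1)).foldl (fun r i =>
        r ++ PySem.List.pyRepeat symbol.toList i ++ text.toList ++ ['\n']) result) []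
  String.ofList result

-- ===== PORT B =====
def che_alt (text : String) (repeats : Int) (dots : Int) (symbol : String) : String :=
  if repeats ≤ 0 ∨ dots ≤ 0 then "" else
  let period := 2 * dots
  let lines : List (List Char) :=
    (PySem.List.pyRange 0 (period * repeats) 1).foldl (fun ls k =>
      let j := PySem.Int.mod k period
      let m := if j < dots then j else period - j
      ls ++ [PySem.List.pyRepeat symbol.toList m ++ text.toList]) []
  String.ofList (PySem.Chars.join ['\n'] lines ++ ['\n'])

-- ===== PRECONDITION & SPEC =====
def Spec_che (text : String) (repeats : Int) (dots : Int) (symbol : String) (out : String) : Prop := out = che_alt text repeats dots symbol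
instance (text : String) (repeats : Int) (dots : Int) (symbol : String) (out : String) : Decidable (Spec_che text repeats dots symbol out) := by unfold Spec_che; infer_instance

-- ===== CLAIM (what is proved, stated in full; the proofs are below) =====
def Claim_equal_che : Prop := ∀ (text : String) (repeats : Int) (dots : Int) (symbol : String), Dom_che text repeats dots symbol → Spec_che text repeats dots symbol (che text repeats dots symbol)

-- ===== LEMMAS AND PROOFS =====

-- the count list of one block: 0,1,…,dots-1,dots,dots-1,…,1
def pvCounts (dots : Int) : List Int :=
  PySem.List.pyRange 0 dots 1 ++ PySem.List.pyRange dots 0 (-1)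

-- the per-index count B computes
def pvCnt (dots k : Int) : Int :=
  let j := PySem.Int.mod k (2 * dots)
  if j < dots then j else 2 * dots - j

-- join with '\n' plus a trailing '\n' is the concatenation of '\n'-terminated lines (nonempty case)
theorem join_newline (ls : List (List Char)) (h : ls ≠ []) :
    PySem.Chars.join ['\n'] ls ++ ['\n'] = (ls.map (· ++ ['\n'])).flatten := by
  induction ls with
  | nil => exact absurd rfl h
  | cons x t ih =>
    cases t with
    | nil => simp [PySem.Chars.join_singleton]
    | cons y t' =>
      rw [PySem.Chars.join_cons_cons]
      simp only [List.map, List.flatten_cons, List.append_assoc]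
      rw [ih (by simp)]
      simp

-- a flatMap of a constant chunk is that chunk replicated
theorem flatMap_const {α β : Type} (l : List β) (C : List α) :
    l.flatMap (fun _ => C) = (List.replicate l.length C).flatten := by
  induction l with
  | nil => simp
  | cons x t ih => simp [ih, List.replicate_succ]

-- flatten/map commute through a replicated block
theorem flatten_map_replicate {α β : Type} (n : Nat) (c : List α) (f : α → List β) :
    ((List.replicate n c).flatten.map f).flatten
      = (List.replicate n ((c.map f).flatten)).flatten := by
  induction n with
  | zero => simp
  | succ m ih => simp only [List.replicate_succ, List.flatten_cons, List.map_append, List.flatten_append, ih]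

-- one block of indices, mapped through pvCnt, gives the count list 0..d-1, d..1
theorem map_cnt_range (d : Int) (hd : 0 < d) :
    (List.range (2 * d).toNat).map (fun k : Nat => pvCnt d k) = pvCounts d := by
  have h2 : (2 * d).toNat = d.toNat + d.toNat := by omega
  rw [h2, List.range_add, List.map_append, List.map_map]
  unfold pvCounts
  rw [PySem.List.pyRange_one, PySem.List.pyRange_neg_one]
  simp only [sub_zero]
  congr 1
  · refine List.map_congr_left (fun k hk => ?_)
    have hk' : k < d.toNat := List.mem_range.mp hk
    unfold pvCnt
    have hm : PySem.Int.mod (k : Int) (2 * d) = (k : Int) := by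
      rw [PySem.Int.mod_eq_emod_of_pos (show (0:Int) < 2 * d by omega)]
      exact Int.emod_eq_of_lt (by omega) (by omega)
    simp only [hm]
    rw [if_pos (by omega)]
    omega
  · refine List.map_congr_left (fun k hk => ?_)
    have hk' : k < d.toNat := List.mem_range.mp hk
    simp only [Function.comp]
    unfold pvCnt
    have hm : PySem.Int.mod ((d.toNat + k : Nat) : Int) (2 * d) = ((d.toNat + k : Nat) : Int) := by
      rw [PySem.Int.mod_eq_emod_of_pos (show (0:Int) < 2 * d by omega)]
      exact Int.emod_eq_of_lt (by omega) (by omega)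
    simp only [hm]
    rw [if_neg (by push_cast; omega)]
    push_cast
    omega

-- the full index range, mapped through pvCnt, is the block count list repeated n times
theorem map_cnt_full (d : Int) (hd : 0 < d) (n : Nat) :
    (PySem.List.pyRange 0 (2 * d * n) 1).map (pvCnt d) =
      (List.replicate n (pvCounts d)).flatten := by
  induction n with
  | zero =>
    rw [PySem.List.pyRange_one_eq_nil (by simp)]
    simp
  | succ m ih =>
    have hsplit : PySem.List.pyRange 0 (2 * d * ((m:Nat) + 1 : Nat)) 1 =
        PySem.List.pyRange 0 (2 * d * m) 1 ++ PySem.List.pyRange (2 * d * m) (2 * d * ((m:Nat) + 1 : Nat)) 1 :=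
      PySem.List.pyRange_one_append _ _ _ (by positivity) (by push_cast; nlinarith)
    rw [hsplit, List.map_append, ih, PySem.List.pyRange_one]
    have hlen : ((2 * d * (((m:Nat) + 1 : Nat) : Int) - 2 * d * m)).toNat = (2 * d).toNat := by
      push_cast; have : 2 * d * ((m:Int) + 1) - 2 * d * m = 2 * d := by ring
      rw [this]
    rw [hlen, List.map_map]
    have hblock : (List.range (2 * d).toNat).map ((pvCnt d) ∘ (fun k : Nat => 2 * d * m + (k:Int)))
        = pvCounts d := by
      rw [← map_cnt_range d hd]
      refine List.map_congr_left (fun k hk => ?_)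
      simp only [Function.comp]
      unfold pvCnt
      have : PySem.Int.mod (2 * d * m + (k:Int)) (2 * d) = PySem.Int.mod (k:Int) (2 * d) := by
        rw [PySem.Int.mod_eq_emod_of_pos (show (0:Int) < 2 * d by omega),
            PySem.Int.mod_eq_emod_of_pos (show (0:Int) < 2 * d by omega)]
        rw [Int.add_comm, Int.add_mul_emod_self_left]
      rw [this]
    rw [hblock, List.replicate_succ']
    simp

-- ===== VERDICT (by name: the statement is the Claim_ definition above) =====
theorem che_spec : Claim_equal_che := by
  intro text repeats dots symbol _
  unfold Spec_che che che_alt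
  by_cases hr : repeats ≤ 0 ∨ dots ≤ 0
  · rw [if_pos hr]
    rcases hr with hr | hd
    · simp [PySem.List.pyRange_one_eq_nil hr]
    · have h1 : PySem.List.pyRange 0 dots 1 = [] := PySem.List.pyRange_one_eq_nil hd
      have h2 : PySem.List.pyRange dots 0 (-1) = [] := PySem.List.pyRange_neg_one_eq_nil hd
      simp [h1, h2]
  · rw [not_or, not_le, not_le] at hr
    obtain ⟨hr0, hd0⟩ := hr
    rw [if_neg (by omega)]
    -- A side: collapse the inner row loops into one appended block, then the outer loop
    simp only [PySem.List.foldl_append_eq_flatMap, List.append_assoc, List.nil_append]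
    rw [flatMap_const]
    -- B side: the foldl building 'lines' is a map; join+newline is flatten of terminated lines
    rw [← List.map_eq_flatMap]
    have hnil : (PySem.List.pyRange 0 (2 * dots * repeats) 1).map
        (fun k => PySem.List.pyRepeat symbol.toList
            (if PySem.Int.mod k (2 * dots) < dots then PySem.Int.mod k (2 * dots)
             else 2 * dots - PySem.Int.mod k (2 * dots)) ++ text.toList) ≠ [] := by
      intro hc
      have hlen := congrArg List.length hc
      rw [List.length_map, PySem.List.length_pyRange_one] at hlen
      simp only [List.length_nil] at hlen
      have : 0 < 2 * dots * repeats := by positivity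
      omega
    rw [join_newline _ hnil, List.map_map]
    have hfull : (PySem.List.pyRange 0 (2 * dots * repeats) 1).map
          ((fun l => l ++ ['\n']) ∘ fun k => PySem.List.pyRepeat symbol.toList
              (if PySem.Int.mod k (2 * dots) < dots then PySem.Int.mod k (2 * dots)
               else 2 * dots - PySem.Int.mod k (2 * dots)) ++ text.toList)
        = ((List.replicate repeats.toNat (pvCounts dots)).flatten).map
            (fun i => PySem.List.pyRepeat symbol.toList i ++ (text.toList ++ ['\n'])) := by
      have hcast : (2 * dots * repeats) = 2 * dots * ((repeats.toNat : Nat) : Int) := by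
        rw [Int.toNat_of_nonneg (le_of_lt hr0)]
      rw [hcast, ← map_cnt_full dots hd0 repeats.toNat, List.map_map]
      refine List.map_congr_left (fun k _ => ?_)
      simp [Function.comp, pvCnt]
    rw [hfull]
    rw [flatten_map_replicate]
    congr 1
    rw [PySem.List.length_pyRange_one]
    simp only [sub_zero]
    congr 1
    unfold pvCounts
    simp [List.flatMap_eq_foldl, List.map_append, List.flatten_append]
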